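-- pv_equiv track=rewrite | github.com/ethroz/qft_gate_counter | gate_count_estimator.py | total_subtraction_t_count
-- ===== SOURCE A (Python) =====
-- def total_subtraction_t_count(n: int, m: int)->int:
--     def subtraction_t_count(j: int)->int:
--         num_xi_gates = 4 * j
--         xi_t_gates = 4
--         return xi_t_gates * num_xi_gates
--     sum = 0
--     for j in range(1, m):
--         sum += subtraction_t_count(j)
--     for j in range(m, n):
--         sum += subtraction_t_count(m - 1)
--     return sum
-- ===== SOURCE B (Python) =====
-- def total_subtraction_t_count(n: int, m: int) -> int:
--     # Closed form: sum_{j=1}^{m-1} 16j = 8*m*(m-1), plus (n-m) copies of 16*(m-1).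
--     first = 8 * m * (m - 1) if m > 1 else 0
--     second = 16 * (m - 1) * (n - m) if n > m else 0
--     return first + second
-- ===== Notes on version B (the rewrite author's own statement) =====
-- stated objective: faster
-- what changed: Replaced the two loops (triangular sum of 16j plus a constant-term loop) with the closed-form expression 8*m*(m-1) + 16*(m-1)*(n-m), guarded for empty ranges.
import Mathlib
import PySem

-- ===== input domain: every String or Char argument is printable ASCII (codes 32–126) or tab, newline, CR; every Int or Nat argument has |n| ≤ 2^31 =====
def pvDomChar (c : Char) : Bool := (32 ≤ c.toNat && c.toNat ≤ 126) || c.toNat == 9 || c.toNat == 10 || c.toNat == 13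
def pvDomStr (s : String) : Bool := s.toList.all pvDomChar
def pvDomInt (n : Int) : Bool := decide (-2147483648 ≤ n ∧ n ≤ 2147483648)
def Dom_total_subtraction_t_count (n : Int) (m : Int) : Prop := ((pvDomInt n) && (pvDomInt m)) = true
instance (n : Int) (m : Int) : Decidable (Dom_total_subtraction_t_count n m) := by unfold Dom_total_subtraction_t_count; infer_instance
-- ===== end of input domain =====

-- B replaces A's two loops by the closed form 8*m*(m-1) + 16*(m-1)*(n-m) (objective: faster, O(1) vs O(n)).

-- ===== PORT A =====
def pvSubTCount (j : Int) : Int :=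
  let num_xi_gates := 4 * j
  let xi_t_gates := 4
  xi_t_gates * num_xi_gates

def total_subtraction_t_count (n : Int) (m : Int) : Int :=
  let s1 := (PySem.List.pyRange 1 m 1).foldl (fun acc j => acc + pvSubTCount j) 0
  (PySem.List.pyRange m n 1).foldl (fun acc _ => acc + pvSubTCount (m - 1)) s1

-- ===== PORT B =====
def total_subtraction_t_count_alt (n : Int) (m : Int) : Int :=
  let first := if m > 1 then 8 * m * (m - 1) else 0
  let second := if n > m then 16 * (m - 1) * (n - m) else 0
  first + second

-- ===== PRECONDITION & SPEC =====
def Spec_total_subtraction_t_count (n : Int) (m : Int) (out : Int) : Prop := out = total_subtraction_t_count_alt n m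
instance (n : Int) (m : Int) (out : Int) : Decidable (Spec_total_subtraction_t_count n m out) := by unfold Spec_total_subtraction_t_count; infer_instance

-- ===== CLAIM (what is proved, stated in full; the proofs are below) =====
def Claim_equal_total_subtraction_t_count : Prop := ∀ (n : Int) (m : Int), Dom_total_subtraction_t_count n m → Spec_total_subtraction_t_count n m (total_subtraction_t_count n m)

-- ===== LEMMAS AND PROOFS =====

-- sum of 16*j for j in range(1, 1+k) equals 8*k*(k+1)
theorem pv_sum_triangle (k : Nat) (init : Int) :
    (PySem.List.pyRange 1 (1 + (k : Int)) 1).foldl (fun acc j => acc + pvSubTCount j) init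
      = init + 8 * k * (k + 1) := by
  induction k generalizing init with
  | zero => simp [PySem.List.pyRange_one_eq_nil (by omega : (1:Int) + 0 ≤ 1)]
  | succ k ih =>
    have h : (1:Int) + (k + 1 : Nat) = (1 + (k:Int)) + 1 := by push_cast; ring
    rw [h, PySem.List.pyRange_one_succ_right (by push_cast; omega)]
    rw [List.foldl_append, ih]
    simp only [List.foldl, pvSubTCount]
    push_cast; ring

-- a fold that adds a constant c over range(a, a+k) adds k*c
theorem pv_sum_const (k : Nat) (a c init : Int) :
    (PySem.List.pyRange a (a + (k : Int)) 1).foldl (fun acc _ => acc + c) init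
      = init + k * c := by
  induction k generalizing init with
  | zero => simp [PySem.List.pyRange_one_eq_nil (by omega : a + 0 ≤ a)]
  | succ k ih =>
    have h : a + (k + 1 : Nat) = (a + (k:Int)) + 1 := by push_cast; ring
    rw [h, PySem.List.pyRange_one_succ_right (by push_cast; omega)]
    rw [List.foldl_append, ih]
    simp only [List.foldl]
    push_cast; ring

theorem pv_sum_const' (a b c init : Int) (h : a ≤ b) :
    (PySem.List.pyRange a b 1).foldl (fun acc _ => acc + c) init = init + (b - a) * c := by
  obtain ⟨k, hk⟩ : ∃ k : Nat, b = a + (k : Int) := ⟨(b - a).toNat, by omega⟩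
  subst hk
  rw [pv_sum_const]
  have : a + (k : Int) - a = (k : Int) := by ring
  rw [this]

-- ===== VERDICT (by name: the statement is the Claim_ definition above) =====
theorem total_subtraction_t_count_spec : Claim_equal_total_subtraction_t_count := by
  intro n m _
  unfold Spec_total_subtraction_t_count total_subtraction_t_count total_subtraction_t_count_alt
  have hs1 : (PySem.List.pyRange 1 m 1).foldl (fun acc j => acc + pvSubTCount j) 0
      = if m > 1 then 8 * m * (m - 1) else 0 := by
    by_cases hm : m > 1
    · have hk : m = 1 + ((m - 1).toNat : Int) := by omega
      rw [hk, pv_sum_triangle]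
      have : ((m - 1).toNat : Int) = m - 1 := by omega
      rw [this]
      simp [hm]; ring
    · rw [PySem.List.pyRange_one_eq_nil (by omega)]
      simp [hm]
  rw [hs1]
  by_cases hn : n > m
  · rw [pv_sum_const' m n _ _ (le_of_lt hn), if_pos hn]
    simp only [pvSubTCount]
    ring
  · rw [PySem.List.pyRange_one_eq_nil (by omega)]
    simp [hn]
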